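-- pv_equiv track=rewrite | github.com/daverayment/AdventOfCode2024 | Day 20/day20.py | do_search
-- ===== SOURCE A (Python) =====
-- def get_offsets(limit):
--     return set([
--         (x, y, abs(x) + abs(y))
--         for x in range(-limit, limit + 1)
--         for y in range(-limit, limit + 1)
--         if abs(x) + abs(y) <= limit
--     ])
--
-- def do_search(track, track_positions, time_limit = 2, min_saving = 100):
--     shortcut_count = 0
--     offsets = get_offsets(time_limit)
--
--     for i, (x, y) in enumerate(track):
--         for dx, dy, time in offsets:
--             x1, y1 = x + dx, y + dy
--             track_pos = track_positions.get((x1, y1), None)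
--             if track_pos is not None and track_pos - i - time >= min_saving:
--                 shortcut_count += 1
--
--     return shortcut_count
-- ===== SOURCE B (Python) =====
-- def do_search(track, track_positions, time_limit = 2, min_saving = 100):
--     shortcut_count = 0
--     for i, (x, y) in enumerate(track):
--         for (x1, y1), j in track_positions.items():
--             dist = abs(x1 - x) + abs(y1 - y)
--             if dist <= time_limit and j - i - dist >= min_saving:
--                 shortcut_count += 1
--     return shortcut_count
-- ===== Notes on version B (the rewrite author's own statement) =====
-- stated objective: faster
-- what changed: B drops the precomputed Manhattan-offset set and the per-cell neighborhood probing; instead it scans each (source cell, dict entry) pair once, computing the Manhattan distance directly and filtering by it, so no O(time_limit^2) offset table is ever built or probed.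
import Mathlib
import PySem

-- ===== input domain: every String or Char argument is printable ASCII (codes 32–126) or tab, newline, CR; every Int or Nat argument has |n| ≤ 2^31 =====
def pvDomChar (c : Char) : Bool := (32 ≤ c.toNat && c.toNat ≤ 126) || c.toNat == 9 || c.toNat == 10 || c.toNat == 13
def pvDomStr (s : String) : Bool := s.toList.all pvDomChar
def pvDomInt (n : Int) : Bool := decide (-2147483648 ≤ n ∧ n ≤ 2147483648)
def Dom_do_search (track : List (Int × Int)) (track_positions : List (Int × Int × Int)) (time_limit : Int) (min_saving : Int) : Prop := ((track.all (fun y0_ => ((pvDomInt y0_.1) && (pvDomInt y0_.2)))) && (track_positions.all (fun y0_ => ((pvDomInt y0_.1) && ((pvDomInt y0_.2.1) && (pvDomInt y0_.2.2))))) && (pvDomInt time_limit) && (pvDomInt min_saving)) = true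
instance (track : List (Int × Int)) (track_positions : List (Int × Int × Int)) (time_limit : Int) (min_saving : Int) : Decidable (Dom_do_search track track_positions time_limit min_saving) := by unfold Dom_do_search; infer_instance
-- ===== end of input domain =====

-- B drops the precomputed Manhattan-offset set and instead scans every (source cell, dict entry)
-- pair, filtering by the Manhattan distance — objective: alternative decomposition, same count.

-- ===== PORT A =====
-- set(<list>): equals PySem.Set.ofList (lemma pvSetOfList_eq below); computed with a hash
-- index only so that the port evaluates in linear rather than quadratic time.
def pvSetOfList (xs : List (Int × Int × Int)) : List (Int × Int × Int) :=
  (xs.foldl (fun (acc : List (Int × Int × Int) × Std.HashSet (Int × Int × Int)) x =>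
      if acc.2.contains x then acc else (x :: acc.1, acc.2.insert x))
    ([], ∅)).1.reverse

-- track_positions.get((x1, y1), None): first-match key lookup over the association list
-- (exact for a Python dict, whose keys are unique — Pre_ requires that).
def pvTpGet? (tp : List (Int × Int × Int)) (x1 y1 : Int) : Option Int :=
  match tp with
  | [] => none
  | (a, b, j) :: rest => if a = x1 ∧ b = y1 then some j else pvTpGet? rest x1 y1

def get_offsets (limit : Int) : List (Int × Int × Int) :=
  pvSetOfList ((PySem.List.pyRange (-limit) (limit + 1) 1).flatMap (fun x =>
    (PySem.List.pyRange (-limit) (limit + 1) 1).flatMap (fun y =>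
      if |x| + |y| ≤ limit then [(x, y, |x| + |y|)] else [])))

-- iterating the Python set: hash order is not modelled, but the loop only counts,
-- so the result is independent of the iteration order; we fold over the Set's list.
def do_search (track : List (Int × Int)) (track_positions : List (Int × Int × Int)) (time_limit : Int) (min_saving : Int) : Int :=
  let offsets := get_offsets time_limit
  (PySem.List.enumerate track).foldl (fun acc p =>
    offsets.foldl (fun acc2 o =>
      match pvTpGet? track_positions (p.2.1 + o.1) (p.2.2 + o.2.1) with
      | some j => if j - p.1 - o.2.2 ≥ min_saving then acc2 + 1 else acc2
      | none => acc2) acc) 0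

-- ===== PORT B =====
-- track_positions.items(): the association list itself (exact for a Python dict, Pre_).
def do_search_alt (track : List (Int × Int)) (track_positions : List (Int × Int × Int)) (time_limit : Int) (min_saving : Int) : Int :=
  (PySem.List.enumerate track).foldl (fun acc p =>
    track_positions.foldl (fun acc2 e =>
      let d := |e.1 - p.2.1| + |e.2.1 - p.2.2|
      if d ≤ time_limit ∧ e.2.2 - p.1 - d ≥ min_saving then acc2 + 1 else acc2) acc) 0

-- ===== PRECONDITION & SPEC =====
-- Pre_ excludes only association lists with duplicate (x, y) keys: those encode no Python dict
-- (the argument is a dict, whose keys are unique), so A's behaviour there is not defined by the Python.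
def Pre_do_search (track : List (Int × Int)) (track_positions : List (Int × Int × Int)) (time_limit : Int) (min_saving : Int) : Prop :=
  (track_positions.map (fun e => (e.1, e.2.1))).Nodup
instance (track : List (Int × Int)) (track_positions : List (Int × Int × Int)) (time_limit : Int) (min_saving : Int) : Decidable (Pre_do_search track track_positions time_limit min_saving) := by unfold Pre_do_search; infer_instance

def pvWitness_do_search : (List (Int × Int)) × (List (Int × Int × Int)) × Int × Int :=
  ([(0, 0), (1, 0), (1, 1)], [(0, 0, 0), (1, 0, 1), (1, 1, 2)], 2, 1)

def Spec_do_search (track : List (Int × Int)) (track_positions : List (Int × Int × Int)) (time_limit : Int) (min_saving : Int) (out : Int) : Prop := out = do_search_alt track track_positions time_limit min_saving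
instance (track : List (Int × Int)) (track_positions : List (Int × Int × Int)) (time_limit : Int) (min_saving : Int) (out : Int) : Decidable (Spec_do_search track track_positions time_limit min_saving out) := by unfold Spec_do_search; infer_instance

-- ===== CLAIM (what is proved, stated in full; the proofs are below) =====
def Claim_equal_do_search : Prop := ∀ (track : List (Int × Int)) (track_positions : List (Int × Int × Int)) (time_limit : Int) (min_saving : Int), Dom_do_search track track_positions time_limit min_saving → Pre_do_search track track_positions time_limit min_saving → Spec_do_search track track_positions time_limit min_saving (do_search track track_positions time_limit min_saving)

-- ===== LEMMAS AND PROOFS =====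

-- the hash-indexed dedup is Python's set(): first occurrences in order
lemma pvSetOfList_aux (xs : List (Int × Int × Int)) (acc : List (Int × Int × Int))
    (hs : Std.HashSet (Int × Int × Int)) (hinv : ∀ z, hs.contains z ↔ z ∈ acc) :
    (xs.foldl (fun (acc : List (Int × Int × Int) × Std.HashSet (Int × Int × Int)) x =>
      if acc.2.contains x then acc else (x :: acc.1, acc.2.insert x)) (acc, hs)).1.reverse
    = xs.foldl PySem.Set.add acc.reverse := by
  induction xs generalizing acc hs with
  | nil => rfl
  | cons x t ih =>
    simp only [List.foldl_cons]
    by_cases h : hs.contains x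
    · rw [if_pos h]
      have hadd : PySem.Set.add acc.reverse x = acc.reverse := by
        unfold PySem.Set.add
        rw [if_pos]
        simp only [PySem.Set.contains, List.contains_iff_mem, List.mem_reverse]
        exact (hinv x).1 h
      rw [hadd]
      exact ih acc hs hinv
    · rw [if_neg h]
      have hx : x ∉ acc := fun hm => h ((hinv x).2 hm)
      have hadd : PySem.Set.add acc.reverse x = (x :: acc).reverse := by
        unfold PySem.Set.add
        rw [if_neg, List.reverse_cons]
        simp only [PySem.Set.contains, List.contains_iff_mem, List.mem_reverse]
        simpa using hx
      rw [hadd]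
      refine ih (x :: acc) (hs.insert x) (fun z => ?_)
      rw [Std.HashSet.contains_insert]
      simp only [Bool.or_eq_true, beq_iff_eq, List.mem_cons]
      constructor
      · rintro (rfl | hz)
        · exact Or.inl rfl
        · exact Or.inr ((hinv z).1 hz)
      · rintro (rfl | hz)
        · exact Or.inl rfl
        · exact Or.inr ((hinv z).2 hz)

lemma pvSetOfList_eq (xs : List (Int × Int × Int)) :
    pvSetOfList xs = PySem.Set.ofList xs := by
  rw [PySem.Set.ofList_eq_foldl, pvSetOfList]
  simpa using pvSetOfList_aux xs [] ∅ (fun z => by simp)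

-- membership in the offset set
lemma mem_get_offsets (L : Int) (o : Int × Int × Int) :
    o ∈ get_offsets L ↔
      (-L ≤ o.1 ∧ o.1 < L + 1) ∧ (-L ≤ o.2.1 ∧ o.2.1 < L + 1) ∧
      |o.1| + |o.2.1| ≤ L ∧ o.2.2 = |o.1| + |o.2.1| := by
  unfold get_offsets
  rw [pvSetOfList_eq, PySem.Set.mem_ofList]
  simp only [List.mem_flatMap, PySem.List.mem_pyRange_one]
  constructor
  · rintro ⟨dx, hdx, dy, hdy, hmem⟩
    rcases Decidable.em (|dx| + |dy| ≤ L) with h | h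
    · simp [h] at hmem; subst hmem; simp_all
    · simp [h] at hmem
  · rintro ⟨h1, h2, h3, h4⟩
    refine ⟨o.1, h1, o.2.1, h2, ?_⟩
    rw [if_pos h3, List.mem_singleton, ← h4]

-- dict lookup on a duplicate-free association list finds exactly the entries of the list
lemma tpGet_eq_some (tp : List (Int × Int × Int))
    (hnd : (tp.map (fun e => (e.1, e.2.1))).Nodup) (a b j : Int) :
    pvTpGet? tp a b = some j ↔ (a, b, j) ∈ tp := by
  induction tp with
  | nil => simp [pvTpGet?]
  | cons hd tl ih =>
    obtain ⟨p, q, r⟩ := hd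
    simp only [List.map_cons, List.nodup_cons, List.mem_map] at hnd
    by_cases hk : p = a ∧ q = b
    · obtain ⟨hp, hq⟩ := hk
      subst hp; subst hq
      rw [show pvTpGet? ((p, q, r) :: tl) p q = some r from by simp [pvTpGet?]]
      simp only [List.mem_cons, Option.some.injEq]
      constructor
      · rintro rfl; left; rfl
      · rintro (h | h)
        · cases h; rfl
        · exact absurd ⟨(p, q, j), h, rfl⟩ hnd.1
    · rw [show pvTpGet? ((p, q, r) :: tl) a b = pvTpGet? tl a b from by
        simp only [pvTpGet?, if_neg hk]]
      rw [ih hnd.2]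
      simp only [List.mem_cons]
      constructor
      · exact Or.inr
      · rintro (h | h)
        · cases h; exact absurd ⟨rfl, rfl⟩ hk
        · exact h

-- entries of a duplicate-free association list are determined by their key
lemma tp_entry_unique (tp : List (Int × Int × Int))
    (hnd : (tp.map (fun e => (e.1, e.2.1))).Nodup)
    {e e' : Int × Int × Int} (he : e ∈ tp) (he' : e' ∈ tp)
    (h1 : e.1 = e'.1) (h2 : e.2.1 = e'.2.1) : e = e' := by
  have h : pvTpGet? tp e.1 e.2.1 = some e.2.2 :=
    (tpGet_eq_some tp hnd e.1 e.2.1 e.2.2).2 (by simpa using he)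
  have h' : pvTpGet? tp e.1 e.2.1 = some e'.2.2 := by
    rw [h1, h2]
    exact (tpGet_eq_some tp hnd e'.1 e'.2.1 e'.2.2).2 (by simpa using he')
  have : e.2.2 = e'.2.2 := by rw [h] at h'; exact Option.some.inj h'
  exact Prod.ext h1 (Prod.ext h2 this)

-- the per-source counts agree: probing the offset set = scanning the dict entries
lemma inner_count_eq (tp : List (Int × Int × Int))
    (hnd : (tp.map (fun e => (e.1, e.2.1))).Nodup) (L m i x y : Int) :
    (get_offsets L).countP (fun o =>
      match pvTpGet? tp (x + o.1) (y + o.2.1) with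
      | some j => decide (j - i - o.2.2 ≥ m)
      | none => false)
    = tp.countP (fun e =>
      decide (|e.1 - x| + |e.2.1 - y| ≤ L ∧ e.2.2 - i - (|e.1 - x| + |e.2.1 - y|) ≥ m)) := by
  have hAnd : (get_offsets L).Nodup := by
    unfold get_offsets; rw [pvSetOfList_eq]; exact PySem.Set.nodup_ofList _
  have hBnd : tp.Nodup := List.Nodup.of_map _ hnd
  rw [List.countP_eq_length_filter, List.countP_eq_length_filter,
      ← List.toFinset_card_of_nodup (hAnd.filter _),
      ← List.toFinset_card_of_nodup (hBnd.filter _),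
      List.toFinset_filter, List.toFinset_filter]
  symm
  refine Finset.card_bij
    (fun e _ => (e.1 - x, e.2.1 - y, |e.1 - x| + |e.2.1 - y|)) ?_ ?_ ?_
  · -- maps into the offset-side filter
    rintro e he
    simp only [Finset.mem_filter, List.mem_toFinset, decide_eq_true_eq] at he ⊢
    obtain ⟨hmem, hd, hc⟩ := he
    have h1 := abs_nonneg (e.1 - x)
    have h2 := abs_nonneg (e.2.1 - y)
    have h3 := le_abs_self (e.1 - x)
    have h4 := neg_abs_le (e.1 - x)
    have h5 := le_abs_self (e.2.1 - y)
    have h6 := neg_abs_le (e.2.1 - y)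
    constructor
    · rw [mem_get_offsets]
      dsimp only
      refine ⟨⟨by omega, by omega⟩, ⟨by omega, by omega⟩, by omega, rfl⟩
    · dsimp only
      have hx : x + (e.1 - x) = e.1 := by omega
      have hy : y + (e.2.1 - y) = e.2.1 := by omega
      rw [hx, hy]
      have hg : pvTpGet? tp e.1 e.2.1 = some e.2.2 :=
        (tpGet_eq_some tp hnd e.1 e.2.1 e.2.2).2 (by simpa using hmem)
      rw [hg]
      simpa using hc
  · -- injective
    rintro e he e' he' heq
    simp only [Finset.mem_filter, List.mem_toFinset] at he he'
    simp only [Prod.mk.injEq] at heq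
    exact tp_entry_unique tp hnd he.1 he'.1 (by omega) (by omega)
  · -- surjective
    rintro o ho
    simp only [Finset.mem_filter, List.mem_toFinset] at ho
    obtain ⟨hmem, hp⟩ := ho
    rw [mem_get_offsets] at hmem
    obtain ⟨_, _, hle, ht⟩ := hmem
    rcases hg : pvTpGet? tp (x + o.1) (y + o.2.1) with _ | j
    · rw [hg] at hp; simp at hp
    · rw [hg] at hp
      simp only [decide_eq_true_eq] at hp
      have hmemB : (x + o.1, y + o.2.1, j) ∈ tp := (tpGet_eq_some tp hnd _ _ j).1 hg
      refine ⟨(x + o.1, y + o.2.1, j), ?_, ?_⟩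
      · simp only [Finset.mem_filter, List.mem_toFinset, decide_eq_true_eq]
        refine ⟨hmemB, ?_⟩
        dsimp only
        have hdx : x + o.1 - x = o.1 := by omega
        have hdy : y + o.2.1 - y = o.2.1 := by omega
        rw [hdx, hdy]
        exact ⟨hle, by rw [← ht]; simpa using hp⟩
      · dsimp only
        have hdx : x + o.1 - x = o.1 := by omega
        have hdy : y + o.2.1 - y = o.2.1 := by omega
        rw [hdx, hdy, ← ht]

-- the inner folds agree
lemma inner_fold_eq (tp : List (Int × Int × Int))
    (hnd : (tp.map (fun e => (e.1, e.2.1))).Nodup) (L m i x y acc : Int) :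
    (get_offsets L).foldl (fun acc2 o =>
      match pvTpGet? tp (x + o.1) (y + o.2.1) with
      | some j => if j - i - o.2.2 ≥ m then acc2 + 1 else acc2
      | none => acc2) acc
    = tp.foldl (fun acc2 e =>
      let d := |e.1 - x| + |e.2.1 - y|
      if d ≤ L ∧ e.2.2 - i - d ≥ m then acc2 + 1 else acc2) acc := by
  have hA : (get_offsets L).foldl (fun acc2 o =>
      match pvTpGet? tp (x + o.1) (y + o.2.1) with
      | some j => if j - i - o.2.2 ≥ m then acc2 + 1 else acc2
      | none => acc2) acc
    = (get_offsets L).foldl (fun acc2 o =>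
      if (match pvTpGet? tp (x + o.1) (y + o.2.1) with
          | some j => decide (j - i - o.2.2 ≥ m)
          | none => false) then acc2 + 1 else acc2) acc := by
    refine PySem.List.foldl_congr_mem _ _ _ _ (fun acc2 o _ => ?_)
    rcases pvTpGet? tp (x + o.1) (y + o.2.1) with _ | j <;> simp
  rw [hA, PySem.List.foldl_if_add_one]
  rw [show tp.foldl (fun acc2 e =>
      let d := |e.1 - x| + |e.2.1 - y|
      if d ≤ L ∧ e.2.2 - i - d ≥ m then acc2 + 1 else acc2) acc
    = tp.foldl (fun acc2 e =>
      if |e.1 - x| + |e.2.1 - y| ≤ L ∧ e.2.2 - i - (|e.1 - x| + |e.2.1 - y|) ≥ m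
      then acc2 + 1 else acc2) acc from rfl]
  rw [PySem.List.foldl_ite_add_one]
  rw [inner_count_eq tp hnd]

-- ===== VERDICT (by name: the statement is the Claim_ definition above) =====
theorem do_search_spec : Claim_equal_do_search := by
  intro track tp L m _ hpre
  unfold Spec_do_search do_search do_search_alt
  refine PySem.List.foldl_congr_mem _ _ _ _ (fun acc p _ => ?_)
  exact inner_fold_eq tp hpre L m p.1 p.2.1 p.2.2 acc
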